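-- pv_equiv track=rewrite | github.com/silvansuter/Polygon-Packing | rectangle_packing.py | calc_coords_of_shelf_packing
-- ===== SOURCE A (Python) =====
-- def calc_coords_of_shelf_packing(shelves,shelf_heights):
--     """
--     Calculates the coordinates for each rectangle given their shelves and shelf heights.
--
--     Args:
--     - shelves (list of list): Packed shelves of rectangles.
--     - shelf_heights (list of int): Heights of each shelf.
--
--     Returns:
--     - list: List of rectangles with their placement coordinates.
--     """
--     # Initialize an empty list to store the placed rectangles with their coordinates
--     rectangles_placed = []
--
--     # Start from the base (H=0) for the first shelf
--     H = 0
--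
--     # Loop through each shelf
--     for i in range(len(shelves)):
--         # Reset the width (W=0) for every new shelf
--         W = 0
--         # Loop through each rectangle in the current shelf
--
--         for j in range(len(shelves[i])):
--             # Append the rectangle with its placement coordinates (bottom-left corner)
--             rectangles_placed += [((W,H),shelves[i][j][0],shelves[i][j][1])]
--             # Increment the width to fit the left side of the next rectangle in the same shelf
--             W += shelves[i][j][0]
--
--         # Increment the height to be equal to the height of the bottom of the next shelf (= height at top of the current shelf)
--         H += shelf_heights[i]
--
--     return rectangles_placed
-- ===== SOURCE B (Python) =====
-- def calc_coords_of_shelf_packing(shelves, shelf_heights):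
--     """Closed-form per-rectangle coordinates: no running accumulators.
--     The x of rectangle j in shelf i is the sum of the widths of the
--     rectangles before it in that shelf, and the y of shelf i is the sum
--     of the heights of the shelves below it; each coordinate is computed
--     independently as a sum over a slice, in one flat comprehension."""
--     return [((sum(w for w, _ in shelf[:j]), sum(shelf_heights[:i])),
--              shelf[j][0], shelf[j][1])
--             for i, shelf in enumerate(shelves)
--             for j in range(len(shelf))]
-- ===== Notes on version B (the rewrite author's own statement) =====
-- stated objective: alternative
-- what changed: Replaces A's stateful double loop with running W/H accumulators by a single flat comprehension that computes each rectangle's coordinates independently in closed form as sums over slices (widths before it in its shelf, shelf heights below it).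
import Mathlib
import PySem

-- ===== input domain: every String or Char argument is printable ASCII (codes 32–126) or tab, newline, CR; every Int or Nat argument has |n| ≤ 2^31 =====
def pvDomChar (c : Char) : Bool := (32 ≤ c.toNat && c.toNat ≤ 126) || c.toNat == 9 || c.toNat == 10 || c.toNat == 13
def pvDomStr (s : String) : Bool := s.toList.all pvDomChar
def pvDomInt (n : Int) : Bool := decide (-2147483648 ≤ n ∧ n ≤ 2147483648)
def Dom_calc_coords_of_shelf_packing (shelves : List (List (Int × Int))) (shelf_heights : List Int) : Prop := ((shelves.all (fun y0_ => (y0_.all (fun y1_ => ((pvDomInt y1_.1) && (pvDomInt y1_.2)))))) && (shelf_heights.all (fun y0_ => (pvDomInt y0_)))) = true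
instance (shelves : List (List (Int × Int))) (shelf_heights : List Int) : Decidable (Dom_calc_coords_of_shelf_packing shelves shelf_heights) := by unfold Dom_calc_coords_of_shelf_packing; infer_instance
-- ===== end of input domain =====

-- B computes each rectangle's coordinates independently in closed form (sums over slices) in one flat
-- comprehension instead of A's stateful double loop with running W/H accumulators; objective: alternative (B is quadratic).

-- ===== PORT A =====
-- Literal port of A: outer loop state = (rectangles_placed, H); inner loop state = (rectangles_placed, W).
-- shelf_heights[i] raises IndexError out of range; under Pre_ the index is in range, so pyGetD is exact.
def calc_coords_of_shelf_packing (shelves : List (List (Int × Int))) (shelf_heights : List Int) : List ((Int × Int) × Int × Int) :=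
  ((PySem.List.enumerate shelves 0).foldl
    (fun (st : List ((Int × Int) × Int × Int) × Int) p =>
      let inner := p.2.foldl
        (fun (st2 : List ((Int × Int) × Int × Int) × Int) r =>
          (st2.1 ++ [((st2.2, st.2), r.1, r.2)], st2.2 + r.1)) (st.1, 0)
      (inner.1, st.2 + PySem.List.pyGetD shelf_heights p.1 0))
    ([], 0)).1

-- ===== PORT B =====
-- Literal port of B (Source B): one flat comprehension; shelf[j] is in range (j from range(len(shelf))), so pyGetD is exact.
def calc_coords_of_shelf_packing_alt (shelves : List (List (Int × Int))) (shelf_heights : List Int) : List ((Int × Int) × Int × Int) :=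
  (PySem.List.enumerate shelves 0).flatMap (fun p =>
    (PySem.List.pyRange 0 (p.2.length : Int) 1).map (fun j =>
      ((((PySem.List.slice p.2 none (some j)).map Prod.fst).sum,
        (PySem.List.slice shelf_heights none (some p.1)).sum),
       (PySem.List.pyGetD p.2 j ((0 : Int), (0 : Int))).1,
       (PySem.List.pyGetD p.2 j ((0 : Int), (0 : Int))).2)))

-- ===== PRECONDITION & SPEC =====
-- Pre_ excludes exactly the inputs where A raises IndexError: fewer shelf heights than shelves.
def Pre_calc_coords_of_shelf_packing (shelves : List (List (Int × Int))) (shelf_heights : List Int) : Prop :=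
  shelves.length ≤ shelf_heights.length
instance (shelves : List (List (Int × Int))) (shelf_heights : List Int) : Decidable (Pre_calc_coords_of_shelf_packing shelves shelf_heights) := by unfold Pre_calc_coords_of_shelf_packing; infer_instance

def pvWitness_calc_coords_of_shelf_packing : (List (List (Int × Int))) × List Int :=
  ([[(1, 2), (3, 1)], [(2, 2)]], [2, 3])

def Spec_calc_coords_of_shelf_packing (shelves : List (List (Int × Int))) (shelf_heights : List Int) (out : List ((Int × Int) × Int × Int)) : Prop := out = calc_coords_of_shelf_packing_alt shelves shelf_heights
instance (shelves : List (List (Int × Int))) (shelf_heights : List Int) (out : List ((Int × Int) × Int × Int)) : Decidable (Spec_calc_coords_of_shelf_packing shelves shelf_heights out) := by unfold Spec_calc_coords_of_shelf_packing; infer_instance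

-- ===== CLAIM =====
def Claim_equal_calc_coords_of_shelf_packing : Prop := ∀ (shelves : List (List (Int × Int))) (shelf_heights : List Int), Dom_calc_coords_of_shelf_packing shelves shelf_heights → Pre_calc_coords_of_shelf_packing shelves shelf_heights → Spec_calc_coords_of_shelf_packing shelves shelf_heights (calc_coords_of_shelf_packing shelves shelf_heights)

-- ===== LEMMAS AND PROOFS =====

-- reference shape shared by both proofs
def pvEmit (H W : Int) : List (Int × Int) → List ((Int × Int) × Int × Int)
  | [] => []
  | r :: rs => ((W, H), r.1, r.2) :: pvEmit H (W + r.1) rs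

def pvSpec (H : Int) : List (List (Int × Int)) → List Int → List ((Int × Int) × Int × Int)
  | [], _ => []
  | s :: ss, hs => pvEmit H 0 s ++ pvSpec (H + hs.headD 0) ss hs.tail

lemma pv_innerA (H : Int) : ∀ (s : List (Int × Int)) (acc : List ((Int × Int) × Int × Int)) (W : Int),
    (s.foldl (fun (st2 : List ((Int × Int) × Int × Int) × Int) r =>
        (st2.1 ++ [((st2.2, H), r.1, r.2)], st2.2 + r.1)) (acc, W)).1
      = acc ++ pvEmit H W s := by
  intro s
  induction s with
  | nil => intro acc W; simp [pvEmit]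
  | cons r s ih =>
      intro acc W
      simp only [List.foldl_cons, pvEmit]
      rw [ih]
      simp

lemma pv_outerA (shelf_heights : List Int) :
    ∀ (ss : List (List (Int × Int))) (k : Nat) (acc : List ((Int × Int) × Int × Int)) (H : Int),
    k + ss.length ≤ shelf_heights.length →
    ((PySem.List.enumerate ss (k : Int)).foldl
      (fun (st : List ((Int × Int) × Int × Int) × Int) p =>
        let inner := p.2.foldl
          (fun (st2 : List ((Int × Int) × Int × Int) × Int) r =>
            (st2.1 ++ [((st2.2, st.2), r.1, r.2)], st2.2 + r.1)) (st.1, 0)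
        (inner.1, st.2 + PySem.List.pyGetD shelf_heights p.1 0))
      (acc, H)).1 = acc ++ pvSpec H ss (shelf_heights.drop k) := by
  intro ss
  induction ss with
  | nil => intro k acc H _; simp [PySem.List.enumerate_nil, pvSpec]
  | cons s ss ih =>
      intro k acc H hk
      rw [PySem.List.enumerate_cons]
      simp only [List.foldl_cons]
      have hklen : k < shelf_heights.length := by simp at hk; omega
      have hc : ((k : Int) + 1) = ((k + 1 : Nat) : Int) := by push_cast; ring
      rw [hc, ih (k + 1) _ _ (by simp at hk ⊢; omega)]
      rw [pv_innerA]
      have hget : PySem.List.pyGetD shelf_heights (k : Int) 0 = (shelf_heights.drop k).headD 0 := by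
        rw [PySem.List.pyGetD_natCast]
        simp [List.getD_eq_getElem?_getD, List.headD_eq_head?_getD, List.head?_drop]
      have hdrop : shelf_heights.drop (k + 1) = (shelf_heights.drop k).tail := by
        rw [List.tail_drop]
      rw [hget, hdrop]
      simp [pvSpec]

-- B side: the closed-form element list equals pvEmit
lemma pv_emit_closed : ∀ (s : List (Int × Int)) (H W : Int),
    (List.range s.length).map (fun k =>
      ((W + ((s.take k).map Prod.fst).sum, H), (s.getD k ((0:Int),(0:Int))).1, (s.getD k ((0:Int),(0:Int))).2))
      = pvEmit H W s := by
  intro s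
  induction s with
  | nil => intro H W; simp [pvEmit]
  | cons r s ih =>
      intro H W
      simp only [List.length_cons]
      rw [List.range_succ_eq_map]
      simp only [List.map_cons, List.map_map, pvEmit, Function.comp_def, List.cons.injEq]
      refine ⟨by simp, ?_⟩
      rw [← ih H (W + r.1)]
      apply List.map_congr_left
      intro k _
      simp
      ring_nf

lemma pv_innerB (base : Int) (s : List (Int × Int)) :
    (PySem.List.pyRange 0 (s.length : Int) 1).map (fun j =>
      ((((PySem.List.slice s none (some j)).map Prod.fst).sum, base),
       (PySem.List.pyGetD s j ((0 : Int), (0 : Int))).1,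
       (PySem.List.pyGetD s j ((0 : Int), (0 : Int))).2))
      = pvEmit base 0 s := by
  rw [PySem.List.pyRange_zero_natCast]
  rw [← pv_emit_closed s base 0, List.map_map]
  apply List.map_congr_left
  intro k hk
  rw [List.mem_range] at hk
  simp only [Function.comp_apply]
  rw [PySem.List.slice_to_natCast, PySem.List.pyGetD_natCast]
  simp

lemma pv_outerB (shelf_heights : List Int) :
    ∀ (ss : List (List (Int × Int))) (k : Nat),
    k + ss.length ≤ shelf_heights.length →
    (PySem.List.enumerate ss (k : Int)).flatMap (fun p =>
      (PySem.List.pyRange 0 (p.2.length : Int) 1).map (fun j =>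
        ((((PySem.List.slice p.2 none (some j)).map Prod.fst).sum,
          (PySem.List.slice shelf_heights none (some p.1)).sum),
         (PySem.List.pyGetD p.2 j ((0 : Int), (0 : Int))).1,
         (PySem.List.pyGetD p.2 j ((0 : Int), (0 : Int))).2)))
      = pvSpec (shelf_heights.take k).sum ss (shelf_heights.drop k) := by
  intro ss
  induction ss with
  | nil => intro k _; simp [PySem.List.enumerate_nil, pvSpec]
  | cons s ss ih =>
      intro k hk
      rw [PySem.List.enumerate_cons]
      simp only [List.flatMap_cons]
      have hklen : k < shelf_heights.length := by simp at hk; omega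
      have hc : ((k : Int) + 1) = ((k + 1 : Nat) : Int) := by push_cast; ring
      rw [hc, ih (k + 1) (by simp at hk ⊢; omega)]
      rw [PySem.List.slice_to_natCast]
      rw [pv_innerB _ s]
      have h1 : (shelf_heights.take (k + 1)).sum
          = (shelf_heights.take k).sum + (shelf_heights.drop k).headD 0 := by
        have hgk : shelf_heights[k]? = some shelf_heights[k] := List.getElem?_eq_getElem hklen
        rw [List.headD_eq_head?_getD, List.head?_drop, hgk]
        simpa using List.sum_take_succ shelf_heights k hklen
      have h2 : shelf_heights.drop (k + 1) = (shelf_heights.drop k).tail := by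
        rw [List.tail_drop]
      rw [h2] at *
      simp [pvSpec, h1]

-- ===== VERDICT =====
theorem calc_coords_of_shelf_packing_spec : Claim_equal_calc_coords_of_shelf_packing := by
  intro shelves shelf_heights _ hpre
  unfold Spec_calc_coords_of_shelf_packing calc_coords_of_shelf_packing calc_coords_of_shelf_packing_alt
  have hA := pv_outerA shelf_heights shelves 0 [] 0 (by simpa using hpre)
  have hB := pv_outerB shelf_heights shelves 0 (by simpa using hpre)
  simp only [Int.natCast_zero] at hA hB
  rw [hA, hB]
  simp
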